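-- pv_equiv track=rewrite | github.com/Quetzal-framework/quetzal-CRUMBS | src/crumbs/interpolate.py | number_of_missing_bands
-- ===== SOURCE A (Python) =====
-- def number_of_missing_bands(band_to_yearBP):
--     assert all(band_to_yearBP[i] <= band_to_yearBP[i+1] for i in range(len(band_to_yearBP) - 1))
--     sum = 0
--     for i in range(len(band_to_yearBP) - 1):
--         left = band_to_yearBP[i]
--         right = band_to_yearBP[i+1]
--         sum += right - left - 1
--     return sum
-- ===== SOURCE B (Python) =====
-- def number_of_missing_bands(band_to_yearBP):
--     assert all(band_to_yearBP[i] <= band_to_yearBP[i+1] for i in range(len(band_to_yearBP) - 1))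
--     if len(band_to_yearBP) < 2:
--         return 0
--     return band_to_yearBP[-1] - band_to_yearBP[0] - (len(band_to_yearBP) - 1)
-- ===== Notes on version B (the rewrite author's own statement) =====
-- stated objective: simpler
-- what changed: The accumulation loop over consecutive pairs is replaced by the telescoped closed form last - first - (n-1); the sortedness assert is kept unchanged.
import Mathlib
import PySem

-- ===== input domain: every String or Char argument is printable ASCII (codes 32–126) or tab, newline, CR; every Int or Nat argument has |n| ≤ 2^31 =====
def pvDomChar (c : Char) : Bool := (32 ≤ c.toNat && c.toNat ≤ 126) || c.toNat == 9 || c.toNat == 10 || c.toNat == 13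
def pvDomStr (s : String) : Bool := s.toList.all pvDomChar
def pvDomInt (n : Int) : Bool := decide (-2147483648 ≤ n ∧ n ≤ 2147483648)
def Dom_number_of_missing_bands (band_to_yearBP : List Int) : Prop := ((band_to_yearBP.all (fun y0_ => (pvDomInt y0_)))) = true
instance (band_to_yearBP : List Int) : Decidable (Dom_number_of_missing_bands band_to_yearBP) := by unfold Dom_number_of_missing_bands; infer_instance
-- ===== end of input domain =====

-- B replaces A's pairwise-difference accumulation loop with the telescoped closed form
-- last - first - (n-1) (objective: simpler); the sortedness assert is kept unchanged.

-- ===== PORT A =====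
def number_of_missing_bands (band_to_yearBP : List Int) : Int :=
  -- the assert passes exactly on inputs satisfying Pre_ below; loop over range(len-1)
  (PySem.List.pyRange 0 ((band_to_yearBP.length : Int) - 1) 1).foldl
    (fun s i =>
      let left := PySem.List.pyGetD band_to_yearBP i 0
      let right := PySem.List.pyGetD band_to_yearBP (i + 1) 0
      s + (right - left - 1)) 0

-- ===== PORT B =====
def number_of_missing_bands_alt (band_to_yearBP : List Int) : Int :=
  -- same assert (passes on Pre_), then the closed form
  if band_to_yearBP.length < 2 then 0
  else
    PySem.List.pyGetD band_to_yearBP (-1) 0 - PySem.List.pyGetD band_to_yearBP 0 0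
      - ((band_to_yearBP.length : Int) - 1)

-- ===== PRECONDITION & SPEC =====
-- Pre_ excludes exactly the unsorted lists, on which A's assert raises AssertionError
-- (B keeps the identical assert, so it raises there too).
def Pre_number_of_missing_bands (band_to_yearBP : List Int) : Prop :=
  List.IsChain (fun a b => a ≤ b) band_to_yearBP

instance (band_to_yearBP : List Int) : Decidable (Pre_number_of_missing_bands band_to_yearBP) := by
  unfold Pre_number_of_missing_bands; infer_instance

def pvWitness_number_of_missing_bands : List Int := [0, 2, 5]

def Spec_number_of_missing_bands (band_to_yearBP : List Int) (out : Int) : Prop := out = number_of_missing_bands_alt band_to_yearBP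
instance (band_to_yearBP : List Int) (out : Int) : Decidable (Spec_number_of_missing_bands band_to_yearBP out) := by unfold Spec_number_of_missing_bands; infer_instance

-- ===== CLAIM (what is proved, stated in full; the proofs are below) =====
def Claim_equal_number_of_missing_bands : Prop := ∀ (band_to_yearBP : List Int), Dom_number_of_missing_bands band_to_yearBP → Pre_number_of_missing_bands band_to_yearBP → Spec_number_of_missing_bands band_to_yearBP (number_of_missing_bands band_to_yearBP)

-- ===== LEMMAS AND PROOFS =====

-- telescoping: the loop's running sum in closed form
theorem fold_telescope (g : Nat → Int) :
    ∀ (m : Nat) (s : Int),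
      (List.range m).foldl (fun s k => s + (g (k + 1) - g k - 1)) s
        = s + g m - g 0 - m := by
  intro m
  induction m with
  | zero => intro s; simp
  | succ m ih =>
      intro s
      rw [List.range_succ, List.foldl_append, ih]
      push_cast
      simp
      try ring

theorem number_of_missing_bands_spec : Claim_equal_number_of_missing_bands := by
  intro xs _ _
  unfold Spec_number_of_missing_bands number_of_missing_bands number_of_missing_bands_alt
  match xs with
  | [] => decide
  | [a] => simp [PySem.List.pyRange]
  | a :: b :: t =>
      have hlen : ¬ (a :: b :: t).length < 2 := by simp
      rw [if_neg hlen]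
      have hn : ((a :: b :: t).length : Int) - 1 = (((a :: b :: t).length - 1 : Nat) : Int) := by
        simp
      rw [hn, PySem.List.pyRange_zero_natCast, List.foldl_map]
      have hfun : (fun (s : Int) (k : Nat) =>
            (fun (s : Int) (i : Int) =>
              let left := PySem.List.pyGetD (a :: b :: t) i 0
              let right := PySem.List.pyGetD (a :: b :: t) (i + 1) 0
              s + (right - left - 1)) s (k : Int))
          = (fun (s : Int) (k : Nat) =>
              s + ((a :: b :: t).getD (k + 1) 0 - (a :: b :: t).getD k 0 - 1)) := by
        funext s k
        have h1 : ((k : Int) + 1) = ((k + 1 : Nat) : Int) := by push_cast; ring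
        simp only [h1, PySem.List.pyGetD_natCast]
      rw [hfun]
      rw [fold_telescope (fun k => (a :: b :: t).getD k 0)]
      have hlt : (a :: b :: t).length - 1 < (a :: b :: t).length := by simp
      rw [PySem.List.pyGetD_neg_ofNat (a :: b :: t) 1 0 (by omega) (by simp),
          PySem.List.pyGetD_zero, List.getD_eq_getElem _ _ hlt]
      simp
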